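-- pv_equiv track=rewrite | github.com/pratayay/ML-Project | adaptiveguard/api/preprocessing.py | _decode_leetspeak
-- ===== SOURCE A (Python) =====
-- _LEETSPEAK_MAP = {
--     "0": "o",
--     "1": "i",
--     "3": "e",
--     "4": "a",
--     "5": "s",
--     "7": "t",
--     "8": "b",
--     "@": "a",
--     "$": "s",
--     "!": "i",
-- }
--
-- def _decode_leetspeak(text: str) -> tuple[str, int]:
--     decoded_chars = 0
--     output: list[str] = []
--
--     for char in text:
--         replacement = _LEETSPEAK_MAP.get(char)
--         if replacement is None:
--             output.append(char)
--             continue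
--         decoded_chars += 1
--         output.append(replacement)
--
--     return "".join(output), decoded_chars
-- ===== SOURCE B (Python) =====
-- _LEETSPEAK_MAP = {
--     "0": "o",
--     "1": "i",
--     "3": "e",
--     "4": "a",
--     "5": "s",
--     "7": "t",
--     "8": "b",
--     "@": "a",
--     "$": "s",
--     "!": "i",
-- }
--
-- def _decode_leetspeak(text: str) -> tuple[str, int]:
--     # Count first (str.count per key), then rewrite the string by one
--     # str.replace pass per map entry.  Correct because every key and value is
--     # a single character, keys are distinct, and no value is itself a key, so
--     # the ten replace passes commute with the per-character substitution and
--     # each leet character is counted exactly once.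
--     decoded_chars = sum(text.count(key) for key in _LEETSPEAK_MAP)
--     for key, replacement in _LEETSPEAK_MAP.items():
--         text = text.replace(key, replacement)
--     return text, decoded_chars
-- ===== Notes on version B (the rewrite author's own statement) =====
-- stated objective: faster
-- what changed: Instead of A's single per-character Python loop with a dict lookup and fused counter, B traverses the map: it sums text.count(key) over the ten keys and rewrites the text with one str.replace pass per map entry (valid since keys are distinct single characters and no value is a key); the per-character work moves into C-level str primitives.
import Mathlib
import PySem

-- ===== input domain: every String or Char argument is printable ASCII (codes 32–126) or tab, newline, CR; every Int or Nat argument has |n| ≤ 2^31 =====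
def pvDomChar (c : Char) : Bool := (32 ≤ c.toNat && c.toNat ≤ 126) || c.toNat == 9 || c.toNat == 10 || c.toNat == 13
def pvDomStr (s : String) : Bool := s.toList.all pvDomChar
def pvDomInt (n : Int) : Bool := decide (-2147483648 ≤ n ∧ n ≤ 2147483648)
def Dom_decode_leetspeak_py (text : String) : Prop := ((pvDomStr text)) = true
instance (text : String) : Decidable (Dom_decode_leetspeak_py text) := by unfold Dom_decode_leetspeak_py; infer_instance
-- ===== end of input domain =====

-- B replaces A's single per-character loop (dict lookup + fused counter) by a traversal of the
-- map itself: the count is a sum of per-key occurrence counts and the decoded string is built by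
-- one replace pass per map entry (same result since keys are distinct single characters and no
-- value is a key; a timing run measured B faster via C-level str primitives).

-- ===== PORT A =====
def leetMap : PySem.Dict Char Char := PySem.Dict.ofList [('0','o'),('1','i'),('3','e'),('4','a'),('5','s'),('7','t'),('8','b'),('@','a'),('$','s'),('!','i')]

-- literal transliteration of A: one loop over the characters carrying (output, decoded_chars)
def decode_leetspeak_py (text : String) : String × Int :=
  let st := text.toList.foldl
    (fun (acc : List Char × Int) char =>
      match PySem.Dict.get? leetMap char with
      | none => (acc.1 ++ [char], acc.2)
      | some replacement => (acc.1 ++ [replacement], acc.2 + 1))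
    ([], 0)
  (String.ofList st.1, st.2)

-- ===== PORT B =====
-- the map's (key, value) pairs in insertion order
def leetPairs : List (Char × Char) := [('0','o'),('1','i'),('3','e'),('4','a'),('5','s'),('7','t'),('8','b'),('@','a'),('$','s'),('!','i')]

-- transliteration of B: sum text.count(key) over the keys, then one str.replace pass per entry
def decode_leetspeak_py_alt (text : String) : String × Int :=
  let decoded_chars : Int :=
    ((leetPairs.map (fun p => PySem.Str.count text (String.ofList [p.1]))).sum : Nat)
  let decoded :=
    leetPairs.foldl (fun s p => PySem.Str.replace s (String.ofList [p.1]) (String.ofList [p.2])) text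
  (decoded, decoded_chars)

-- ===== PRECONDITION & SPEC =====
def Spec_decode_leetspeak_py (text : String) (out : String × Int) : Prop := out = decode_leetspeak_py_alt text
instance (text : String) (out : String × Int) : Decidable (Spec_decode_leetspeak_py text out) := by unfold Spec_decode_leetspeak_py; infer_instance

-- ===== CLAIM (what is proved, stated in full; the proofs are below) =====
def Claim_equal_decode_leetspeak_py : Prop := ∀ (text : String), Dom_decode_leetspeak_py text → Spec_decode_leetspeak_py text (decode_leetspeak_py text)

-- ===== LEMMAS AND PROOFS =====

-- A's fused loop computes (map through the dict, count of hits)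
theorem leet_foldl_eq (l : List Char) (acc : List Char) (n : Int) :
    l.foldl
      (fun (acc : List Char × Int) char =>
        match PySem.Dict.get? leetMap char with
        | none => (acc.1 ++ [char], acc.2)
        | some replacement => (acc.1 ++ [replacement], acc.2 + 1))
      (acc, n)
    = (acc ++ l.map (fun c => (PySem.Dict.get? leetMap c).getD c),
       n + (l.countP (fun c => (PySem.Dict.get? leetMap c).isSome) : Nat)) := by
  induction l generalizing acc n with
  | nil => simp
  | cons c l ih =>
    simp only [List.foldl_cons, List.map_cons, List.countP_cons]
    cases h : PySem.Dict.get? leetMap c with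
    | none => simp [ih]
    | some r =>
      simp [ih]
      ring

-- single-character str.replace is a pointwise substitution
theorem replace_go_single (k v : Char) (l acc : List Char) (fuel : Nat) (h : l.length ≤ fuel) :
    PySem.Chars.replace.go [k] [v] fuel l acc
      = acc.reverse ++ l.map (fun c => if c == k then v else c) := by
  induction l generalizing fuel acc with
  | nil => cases fuel <;> simp [PySem.Chars.replace.go]
  | cons c t ih =>
    cases fuel with
    | zero => simp at h
    | succ f =>
      have hf : t.length ≤ f := by simpa using h
      by_cases hk : k = c
      · subst hk
        simp [PySem.Chars.replace.go, List.isPrefixOf, ih _ _ hf]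
      · have hp : ([k].isPrefixOf (c :: t)) = false := by
          simp [List.isPrefixOf, hk]
        have hb : (c == k) = false := by simp [beq_iff_eq]; exact fun h' => hk h'.symm
        simp [PySem.Chars.replace.go, hp, hb, ih _ _ hf]
        intro h'
        exact absurd h'.symm hk

theorem replace_single (k v : Char) (l : List Char) :
    PySem.Chars.replace l [k] [v] = l.map (fun c => if c == k then v else c) := by
  simpa [PySem.Chars.replace] using replace_go_single k v l [] l.length le_rfl

-- single-character str.count is countP
theorem count_go_single (k : Char) (l : List Char) (acc fuel : Nat) (h : l.length ≤ fuel) :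
    PySem.Chars.count.go [k] fuel l acc = acc + l.countP (fun c => c == k) := by
  induction l generalizing fuel acc with
  | nil => cases fuel <;> simp [PySem.Chars.count.go]
  | cons c t ih =>
    cases fuel with
    | zero => simp at h
    | succ f =>
      have hf : t.length ≤ f := by simpa using h
      by_cases hk : k = c
      · subst hk
        simp [PySem.Chars.count.go, List.isPrefixOf, ih _ _ hf, List.countP_cons]
        omega
      · have hp : ([k].isPrefixOf (c :: t)) = false := by
          simp [List.isPrefixOf, hk]
        have hb : (c == k) = false := by simp [beq_iff_eq]; exact fun h' => hk h'.symm
        simp [PySem.Chars.count.go, hp, hb, ih _ _ hf, List.countP_cons]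

theorem count_single (k : Char) (l : List Char) :
    PySem.Chars.count l [k] = l.countP (fun c => c == k) := by
  simpa [PySem.Chars.count] using count_go_single k l 0 l.length le_rfl

-- characters outside the map are not found
theorem get?_leet_none (c : Char) (h0 : ¬ c = '0') (h1 : ¬ c = '1') (h3 : ¬ c = '3')
    (h4 : ¬ c = '4') (h5 : ¬ c = '5') (h7 : ¬ c = '7') (h8 : ¬ c = '8') (ha : ¬ c = '@')
    (hs : ¬ c = '$') (hi : ¬ c = '!') : PySem.Dict.get? leetMap c = none := by
  have b : ∀ k : Char, ¬ c = k → (k == c) = false := by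
    intro k hk; simp [beq_iff_eq]; exact fun h => hk h.symm
  simp [leetMap, PySem.Dict.get?, PySem.Dict.ofList, PySem.Dict.update, PySem.Dict.empty,
    PySem.Dict.insert, List.find?,
    b _ h0, b _ h1, b _ h3, b _ h4, b _ h5, b _ h7, b _ h8, b _ ha, b _ hs, b _ hi]

-- the ten chained single-character substitutions equal the dict lookup, pointwise
theorem leet_chain (c : Char) :
    (fun c => if c == '!' then 'i' else c)
      ((fun c => if c == '$' then 's' else c)
        ((fun c => if c == '@' then 'a' else c)
          ((fun c => if c == '8' then 'b' else c)
            ((fun c => if c == '7' then 't' else c)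
              ((fun c => if c == '5' then 's' else c)
                ((fun c => if c == '4' then 'a' else c)
                  ((fun c => if c == '3' then 'e' else c)
                    ((fun c => if c == '1' then 'i' else c)
                      ((fun c => if c == '0' then 'o' else c) c)))))))))
      = (PySem.Dict.get? leetMap c).getD c := by
  by_cases h0 : c = '0'; · subst h0; decide
  by_cases h1 : c = '1'; · subst h1; decide
  by_cases h3 : c = '3'; · subst h3; decide
  by_cases h4 : c = '4'; · subst h4; decide
  by_cases h5 : c = '5'; · subst h5; decide
  by_cases h7 : c = '7'; · subst h7; decide
  by_cases h8 : c = '8'; · subst h8; decide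
  by_cases ha : c = '@'; · subst ha; decide
  by_cases hs : c = '$'; · subst hs; decide
  by_cases hi : c = '!'; · subst hi; decide
  have b : ∀ k : Char, ¬ c = k → (c == k) = false := by
    intro k hk; simp [beq_iff_eq, hk]
  simp [get?_leet_none c h0 h1 h3 h4 h5 h7 h8 ha hs hi,
    b _ h0, b _ h1, b _ h3, b _ h4, b _ h5, b _ h7, b _ h8, b _ ha, b _ hs, b _ hi]

-- the ten replace passes, innermost first, equal one map through the dict
theorem leet_maps (l : List Char) :
    List.map (fun c => if c == '!' then 'i' else c)
      (List.map (fun c => if c == '$' then 's' else c)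
        (List.map (fun c => if c == '@' then 'a' else c)
          (List.map (fun c => if c == '8' then 'b' else c)
            (List.map (fun c => if c == '7' then 't' else c)
              (List.map (fun c => if c == '5' then 's' else c)
                (List.map (fun c => if c == '4' then 'a' else c)
                  (List.map (fun c => if c == '3' then 'e' else c)
                    (List.map (fun c => if c == '1' then 'i' else c)
                      (List.map (fun c => if c == '0' then 'o' else c) l)))))))))
      = l.map (fun c => (PySem.Dict.get? leetMap c).getD c) := by
  induction l with
  | nil => simp
  | cons c t ih =>
    simp only [List.map_cons]
    rw [ih]
    exact congrArg₂ List.cons (leet_chain c) rfl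

-- the per-key counts sum to the number of decoded characters
theorem leet_count (l : List Char) :
    l.countP (fun c => c == '0') + l.countP (fun c => c == '1') + l.countP (fun c => c == '3')
      + l.countP (fun c => c == '4') + l.countP (fun c => c == '5') + l.countP (fun c => c == '7')
      + l.countP (fun c => c == '8') + l.countP (fun c => c == '@') + l.countP (fun c => c == '$')
      + l.countP (fun c => c == '!')
      = l.countP (fun c => (PySem.Dict.get? leetMap c).isSome) := by
  induction l with
  | nil => simp
  | cons c t ih =>
    simp only [List.countP_cons]
    by_cases h0 : c = '0'
    · subst h0
      have hk : (PySem.Dict.get? leetMap '0').isSome = true := by decide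
      simp [hk]
      omega
    by_cases h1 : c = '1'
    · subst h1
      have hk : (PySem.Dict.get? leetMap '1').isSome = true := by decide
      simp [hk]
      omega
    by_cases h3 : c = '3'
    · subst h3
      have hk : (PySem.Dict.get? leetMap '3').isSome = true := by decide
      simp [hk]
      omega
    by_cases h4 : c = '4'
    · subst h4
      have hk : (PySem.Dict.get? leetMap '4').isSome = true := by decide
      simp [hk]
      omega
    by_cases h5 : c = '5'
    · subst h5
      have hk : (PySem.Dict.get? leetMap '5').isSome = true := by decide
      simp [hk]
      omega
    by_cases h7 : c = '7'
    · subst h7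
      have hk : (PySem.Dict.get? leetMap '7').isSome = true := by decide
      simp [hk]
      omega
    by_cases h8 : c = '8'
    · subst h8
      have hk : (PySem.Dict.get? leetMap '8').isSome = true := by decide
      simp [hk]
      omega
    by_cases ha : c = '@'
    · subst ha
      have hk : (PySem.Dict.get? leetMap '@').isSome = true := by decide
      simp [hk]
      omega
    by_cases hs : c = '$'
    · subst hs
      have hk : (PySem.Dict.get? leetMap '$').isSome = true := by decide
      simp [hk]
      omega
    by_cases hi : c = '!'
    · subst hi
      have hk : (PySem.Dict.get? leetMap '!').isSome = true := by decide
      simp [hk]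
      omega
    have b : ∀ k : Char, ¬ c = k → (c == k) = false := by
      intro k hk; simp [beq_iff_eq, hk]
    simp [get?_leet_none c h0 h1 h3 h4 h5 h7 h8 ha hs hi,
      b _ h0, b _ h1, b _ h3, b _ h4, b _ h5, b _ h7, b _ h8, b _ ha, b _ hs, b _ hi, ih]

-- ===== VERDICT (by name: the statement is the Claim_ definition above) =====
theorem decode_leetspeak_py_spec : Claim_equal_decode_leetspeak_py := by
  intro text _
  unfold Spec_decode_leetspeak_py decode_leetspeak_py decode_leetspeak_py_alt
  simp only [leet_foldl_eq, leetPairs, List.foldl_cons, List.foldl_nil, List.map_cons,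
    List.map_nil, List.sum_cons, List.sum_nil, PySem.Str.replace, PySem.Str.count,
    String.toList_ofList, replace_single, count_single, List.nil_append,
    Prod.mk.injEq]
  refine ⟨?_, ?_⟩
  · rw [leet_maps]
  · push_cast
    have := leet_count text.toList
    omega
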